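-- pv_equiv track=rewrite | github.com/spenpal/sloth-bytes-weekly-challenges | challenges/2025/18/main.py | is_shuffled_well
-- ===== SOURCE A (Python) =====
-- from itertools import pairwise
--
-- def is_shuffled_well(nums: list[int]) -> bool:
--     streak = 1
--     for a, b in pairwise(nums):
--         if abs(a - b) == 1:
--             streak += 1
--             if streak >= 3:
--                 return False
--         else:
--             streak = 1
--     return True
-- ===== SOURCE B (Python) =====
-- def is_shuffled_well(nums: list[int]) -> bool:
--     bits = "".join("1" if abs(a - b) == 1 else "0" for a, b in zip(nums, nums[1:]))
--     return "11" not in bits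
-- ===== Notes on version B (the rewrite author's own statement) =====
-- stated objective: alternative
-- what changed: Two staged passes instead of a stateful streak counter: first encode each adjacent pair as a '1'/'0' bit-string, then decide by a substring search for "11" instead of scanning with an accumulator.
import Mathlib
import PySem

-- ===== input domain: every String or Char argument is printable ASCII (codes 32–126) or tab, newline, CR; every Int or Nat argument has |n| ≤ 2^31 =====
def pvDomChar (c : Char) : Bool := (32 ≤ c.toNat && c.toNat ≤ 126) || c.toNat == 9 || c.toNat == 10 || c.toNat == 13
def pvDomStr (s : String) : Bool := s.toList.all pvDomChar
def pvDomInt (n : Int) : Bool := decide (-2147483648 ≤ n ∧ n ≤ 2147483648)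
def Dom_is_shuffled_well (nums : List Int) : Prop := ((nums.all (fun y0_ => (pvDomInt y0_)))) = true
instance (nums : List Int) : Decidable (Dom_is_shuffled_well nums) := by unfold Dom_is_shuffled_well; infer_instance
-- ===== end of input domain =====

-- B replaces A's stateful streak counter with two staged passes: encode adjacent pairs as a '1'/'0' bit-string, then a substring search for "11" (alternative decomposition, same cost).


-- ===== PORT A =====
-- the 'for a, b in pairwise(nums)' loop: structural recursion over adjacent pairs,
-- carrying the streak counter exactly as A does
def pyLoopA : Int → List Int → Bool
  | streak, a :: b :: rest =>
    if (a - b).natAbs == 1 then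
      if streak + 1 ≥ 3 then false
      else pyLoopA (streak + 1) (b :: rest)
    else pyLoopA 1 (b :: rest)
  | _, _ => true

def is_shuffled_well (nums : List Int) : Bool := pyLoopA 1 nums

-- ===== PORT B =====
-- bits = "".join("1" if abs(a-b)==1 else "0" for a,b in zip(nums, nums[1:])); return "11" not in bits
def is_shuffled_well_alt (nums : List Int) : Bool :=
  !(PySem.Str.isIn "11"
    (PySem.Str.join ""
      ((nums.zip (PySem.List.slice nums (some 1) none)).map
        (fun p => if (p.1 - p.2).natAbs == 1 then "1" else "0"))))

-- ===== PRECONDITION & SPEC =====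
def Spec_is_shuffled_well (nums : List Int) (out : Bool) : Prop := out = is_shuffled_well_alt nums
instance (nums : List Int) (out : Bool) : Decidable (Spec_is_shuffled_well nums out) := by unfold Spec_is_shuffled_well; infer_instance

-- ===== CLAIM (what is proved, stated in full; the proofs are below) =====
def Claim_equal_is_shuffled_well : Prop := ∀ (nums : List Int), Dom_is_shuffled_well nums → Spec_is_shuffled_well nums (is_shuffled_well nums)

-- ===== LEMMAS AND PROOFS =====

-- the bit character of one adjacent pair
def pvBit (a b : Int) : Char := if (a - b).natAbs == 1 then '1' else '0'

-- the bit string of a list, as a list of chars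
def pvBits : List Int → List Char
  | a :: b :: rest => pvBit a b :: pvBits (b :: rest)
  | _ => []

theorem pvBits_eq (l : List Int) :
    (l.zip l.tail).map (fun p => pvBit p.1 p.2) = pvBits l := by
  match l with
  | [] => rfl
  | [_] => rfl
  | a :: b :: r =>
    have ih := pvBits_eq (b :: r)
    simp only [List.tail_cons, List.zip_cons_cons, List.map_cons, pvBits] at ih ⊢
    rw [ih]

theorem pvBitsStr (nums : List Int) :
    (PySem.Str.join ""
      ((nums.zip (PySem.List.slice nums (some 1) none)).map
        (fun p => if (p.1 - p.2).natAbs == 1 then "1" else "0"))).toList = pvBits nums := by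
  rw [PySem.Str.toList_join, PySem.List.slice_from_one, List.map_map]
  have : (String.toList ∘ fun p : Int × Int => if (p.1 - p.2).natAbs == 1 then "1" else "0")
      = (fun c => [c]) ∘ (fun p : Int × Int => pvBit p.1 p.2) := by
    funext p
    simp only [Function.comp, pvBit]
    split <;> rfl
  rw [this, ← List.map_map, pvBits_eq]
  simp [PySem.Chars.join_nil_singletons]

-- "11" found among x :: y :: r: either at the head or further right
theorem pvIsIn11_cons (x y : Char) (r : List Char) :
    PySem.Chars.isIn ['1', '1'] (x :: y :: r)
      = (((x == '1') && (y == '1')) || PySem.Chars.isIn ['1', '1'] (y :: r)) := by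
  rw [Bool.eq_iff_iff]
  simp [PySem.Chars.isIn_iff_infix, List.infix_cons_iff, List.cons_prefix_cons, @eq_comm Char '1']

theorem pvIsIn11_short (s : List Char) (h : s.length ≤ 1) :
    PySem.Chars.isIn ['1', '1'] s = false := by
  match s, h with
  | [], _ => decide
  | [x], _ =>
    rw [Bool.eq_false_iff, Ne, Bool.eq_iff_iff]
    simp [PySem.Chars.isIn_iff_infix, List.infix_cons_iff, List.cons_prefix_cons]

-- A's streak loop, read off windows of three (intermediate form for A's side)
def pvTriple : List Int → Bool
  | a :: b :: c :: rest =>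
    if ((a - b).natAbs == 1) && ((b - c).natAbs == 1) then false
    else pvTriple (b :: c :: rest)
  | _ => true

theorem pvTriple_skip (b c : Int) (r : List Int) (h : ((b - c).natAbs == 1) = false) :
    pvTriple (b :: c :: r) = pvTriple (c :: r) := by
  match r with
  | [] => simp [pvTriple]
  | x :: r' => simp [pvTriple, h]

theorem pyLoopA_one (a b : Int) (r : List Int) :
    pyLoopA 1 (a :: b :: r) =
      if ((a - b).natAbs == 1) = true then pyLoopA 2 (b :: r) else pyLoopA 1 (b :: r) := by
  simp [pyLoopA]

theorem pyLoopA_two (a b : Int) (r : List Int) :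
    pyLoopA 2 (a :: b :: r) =
      if ((a - b).natAbs == 1) = true then false else pyLoopA 1 (b :: r) := by
  simp [pyLoopA]

theorem pvA_eq_triple (l : List Int) : pyLoopA 1 l = pvTriple l := by
  match l with
  | [] => rfl
  | [_] => rfl
  | [a, b] =>
    rw [pyLoopA_one]
    split <;> rfl
  | a :: b :: c :: r =>
    have ih1 := pvA_eq_triple (b :: c :: r)
    have ih2 := pvA_eq_triple (c :: r)
    rw [pyLoopA_one, pvTriple]
    by_cases hab : ((a - b).natAbs == 1) = true
    · rw [if_pos hab, pyLoopA_two]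
      by_cases hbc : ((b - c).natAbs == 1) = true
      · simp [hab, hbc]
      · simp only [Bool.not_eq_true] at hbc
        simp [hab, hbc, ih2, pvTriple_skip b c r hbc]
    · simp only [Bool.not_eq_true] at hab
      simp [hab, ih1]
termination_by l.length

theorem pvBit_eq_one (a b : Int) : (pvBit a b == '1') = ((a - b).natAbs == 1) := by
  unfold pvBit; split <;> simp_all

theorem pvTriple_eq_not_isIn (l : List Int) :
    pvTriple l = !(PySem.Chars.isIn ['1', '1'] (pvBits l)) := by
  match l with
  | [] => decide
  | [x] => show true = !(PySem.Chars.isIn ['1', '1'] []); decide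
  | [a, b] => show true = !(PySem.Chars.isIn ['1', '1'] [pvBit a b])
              rw [pvIsIn11_short [pvBit a b] (by simp)]; rfl
  | a :: b :: c :: r =>
    have ih := pvTriple_eq_not_isIn (b :: c :: r)
    show pvTriple (a :: b :: c :: r)
      = !(PySem.Chars.isIn ['1', '1'] (pvBit a b :: pvBit b c :: pvBits (c :: r)))
    rw [pvIsIn11_cons, pvBit_eq_one, pvBit_eq_one, pvTriple]
    by_cases h : (((a - b).natAbs == 1) && ((b - c).natAbs == 1)) = true
    · simp [h]
    · simp only [Bool.not_eq_true] at h
      simpa [h] using ih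
termination_by l.length

-- ===== VERDICT (by name: the statement is the Claim_ definition above) =====
theorem is_shuffled_well_spec : Claim_equal_is_shuffled_well := by
  intro nums _
  show pyLoopA 1 nums = is_shuffled_well_alt nums
  rw [pvA_eq_triple, pvTriple_eq_not_isIn]
  unfold is_shuffled_well_alt
  rw [PySem.Str.isIn_eq, pvBitsStr nums]
  rfl
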